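-- pv_equiv track=rewrite | github.com/2597688js/dsa_practices | zzz_self_practices_again/2.binary_search_prac.py | binary_search_prac
-- ===== SOURCE A (Python) =====
-- def binary_search_prac(arr, k):
--     arr = sorted(arr)  # For binary search to work, array has to be in sorted order
--
--     left = 0     # to keep track of left index
--     right = len(arr) - 1     # keep track of right index
--
--     while left <= right:
--         mid = left + ((right - left) // 2)     # mid index
--
--         if k == arr[mid]:       # if array element at mid index  is equal to the target element(k)
--             return f"{k} found at {mid} index"
--         elif k < arr[mid]:    # if k is less than array element at the mid index, move the right index
--             right = mid - 1
--         elif k > arr[mid]: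
--             left = mid + 1
-- ===== SOURCE B (Python) =====
-- def binary_search_prac(arr, k):
--     for i, v in enumerate(sorted(arr)):
--         if v == k:
--             return f"{k} found at {i} index"
-- ===== Notes on version B (the rewrite author's own statement) =====
-- stated objective: simpler
-- what changed: The sort-then-binary-search while loop is replaced by a single linear scan of the sorted list (enumerate + equality test), which returns the unique position of k when k occurs at most once.
-- outside the precondition, e.g. on binary_search_prac([1, 1, 1], 1): A returns '1 found at 1 index', B returns '1 found at 0 index'
import Mathlib
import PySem

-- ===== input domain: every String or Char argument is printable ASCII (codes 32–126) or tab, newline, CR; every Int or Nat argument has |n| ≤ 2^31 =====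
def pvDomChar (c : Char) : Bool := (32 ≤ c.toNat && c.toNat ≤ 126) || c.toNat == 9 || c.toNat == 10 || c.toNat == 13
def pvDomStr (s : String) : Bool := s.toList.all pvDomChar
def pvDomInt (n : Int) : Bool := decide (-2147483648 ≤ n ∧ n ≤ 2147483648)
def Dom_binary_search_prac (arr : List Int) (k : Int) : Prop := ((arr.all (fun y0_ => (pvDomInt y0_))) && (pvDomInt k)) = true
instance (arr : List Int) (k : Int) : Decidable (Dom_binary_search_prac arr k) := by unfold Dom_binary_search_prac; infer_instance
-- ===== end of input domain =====

-- B replaces A's iterative binary search over the sorted list by a single linear scan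
-- (simpler); equality is proved where k occurs at most once in arr.


-- ===== PORT A =====
-- A's while loop, state (left, right); arr[mid] is ported with pyGet? (its 'none' arm is
-- Python's IndexError, unreachable here); fuel is a pure totality guard, never exhausted
-- from the entry point (the interval shrinks every iteration, so length+1 always suffices)
def pvLoopA (a : List Int) (k : Int) (left right : Int) : Nat → Option String
  | 0 => none
  | fuel + 1 =>
    if left ≤ right then
      let mid := left + (PySem.Int.floordiv (right - left) 2)
      match PySem.List.pyGet? a mid with
      | none => none
      | some v =>
        if k = v then some (PySem.Int.toStr k ++ " found at " ++ PySem.Int.toStr mid ++ " index")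
        else if k < v then pvLoopA a k left (mid - 1) fuel
        else pvLoopA a k (mid + 1) right fuel   -- final 'elif k > arr[mid]' (only remaining case for ints)
    else none

def binary_search_prac (arr : List Int) (k : Int) : Option String :=
  let arr := PySem.List.sorted arr (fun x => x)
  pvLoopA arr k 0 (arr.length - 1) (arr.length + 1)

-- ===== PORT B =====
-- Source B's 'for i, v in enumerate(sorted(arr))' scan
def pvScanB (k : Int) : List Int → Nat → Option String
  | [], _ => none
  | v :: rest, i =>
    if v = k then some (PySem.Int.toStr k ++ " found at " ++ PySem.Int.toStr (i : Int) ++ " index")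
    else pvScanB k rest (i + 1)

def binary_search_prac_alt (arr : List Int) (k : Int) : Option String :=
  pvScanB k (PySem.List.sorted arr (fun x => x)) 0

-- ===== PRECONDITION & SPEC =====
-- Pre_ excludes lists in which k occurs more than once: there A's binary search lands on an
-- accidental one of the equal positions while B reports the first — a tie no caller could rely on.
def Pre_binary_search_prac (arr : List Int) (k : Int) : Prop := arr.count k ≤ 1
instance (arr : List Int) (k : Int) : Decidable (Pre_binary_search_prac arr k) := by unfold Pre_binary_search_prac; infer_instance
def pvWitness_binary_search_prac : List Int × Int := ([3, 1, 2], 2)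

def Spec_binary_search_prac (arr : List Int) (k : Int) (out : Option String) : Prop := out = binary_search_prac_alt arr k
instance (arr : List Int) (k : Int) (out : Option String) : Decidable (Spec_binary_search_prac arr k out) := by unfold Spec_binary_search_prac; infer_instance

-- ===== CLAIM (what is proved, stated in full; the proofs are below) =====
def Claim_equal_binary_search_prac : Prop := ∀ (arr : List Int) (k : Int), Dom_binary_search_prac arr k → Pre_binary_search_prac arr k → Spec_binary_search_prac arr k (binary_search_prac arr k)

-- ===== LEMMAS AND PROOFS =====

-- B's scan returns the message of the first occurrence, offset by the accumulator
theorem pvScanB_eq_index? (k : Int) (a : List Int) (i : Nat) :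
    pvScanB k a i = (PySem.List.index? a k).map
      (fun j => PySem.Int.toStr k ++ " found at " ++ PySem.Int.toStr ((i + j : Nat) : Int) ++ " index") := by
  induction a generalizing i with
  | nil => rfl
  | cons v rest ih =>
    by_cases hv : v = k
    · subst hv
      rw [PySem.List.index?_cons_self v rest]
      simp [pvScanB]
    · rw [PySem.List.index?_cons_of_ne rest hv]
      simp only [pvScanB, hv, if_false, ih, Option.map_map]
      cases PySem.List.index? rest k with
      | none => rfl
      | some j =>
        simp only [Option.map_some, Function.comp_apply]
        have h : i + 1 + j = i + (j + 1) := by omega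
        rw [h]

-- if k occurs at most once and a[m] = k, the first occurrence is m
theorem index?_eq_of_count_le_one (a : List Int) (k : Int) (m : Nat)
    (hc : a.count k ≤ 1) (hm : m < a.length) (hv : a[m] = k) :
    PySem.List.index? a k = some m := by
  have hmem : k ∈ a := hv ▸ a.getElem_mem hm
  have hsome : (PySem.List.index? a k).isSome := (PySem.List.index?_isSome_iff a k).2 hmem
  obtain ⟨j, hj⟩ := Option.isSome_iff_exists.1 hsome
  obtain ⟨pre, suf, heq, hlen, hnot⟩ := (PySem.List.index?_eq_some_iff a k j).1 hj
  rcases lt_trichotomy m j with h | h | h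
  · exfalso
    have hpre : a[m] ∈ pre := by
      subst heq hlen
      rw [List.getElem_append_left (by omega)] at hv ⊢
      exact List.getElem_mem _
    exact hnot (hv ▸ hpre)
  · subst h; exact hj
  · exfalso
    have hksuf : k ∈ suf := by
      subst heq hlen
      simp only [List.length_append, List.length_cons] at hm
      obtain ⟨t, ht, hts⟩ : ∃ t, m - pre.length = t + 1 ∧ t < suf.length :=
        ⟨m - pre.length - 1, by omega, by omega⟩
      have : (pre ++ k :: suf)[m] = suf[t] := by
        rw [List.getElem_append_right (by omega)]
        simp only [ht, List.getElem_cons_succ]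
      rw [this] at hv
      exact hv ▸ List.getElem_mem _
    have h2 : 2 ≤ a.count k := by
      subst heq
      rw [List.count_append, List.count_cons_self]
      have := List.count_pos_iff.2 hksuf
      omega
    omega

-- the binary-search loop on the sorted list also returns the first occurrence, provided the
-- (unique) occurrence of k, if any, lies inside [lo, hi]
theorem pvLoopA_eq_index? (arr : List Int) (k : Int) :
    ∀ (fuel : Nat) (lo hi : Int),
      (PySem.List.sorted arr (fun x => x)).count k ≤ 1 →
      0 ≤ lo → hi ≤ (PySem.List.sorted arr (fun x => x)).length - 1 →
      hi - lo < (fuel : Int) →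
      (∀ (j : Nat) (hj : j < (PySem.List.sorted arr (fun x => x)).length),
          (PySem.List.sorted arr (fun x => x))[j] = k → lo ≤ (j : Int) ∧ (j : Int) ≤ hi) →
      pvLoopA (PySem.List.sorted arr (fun x => x)) k lo hi fuel =
        (PySem.List.index? (PySem.List.sorted arr (fun x => x)) k).map
          (fun j => PySem.Int.toStr k ++ " found at " ++ PySem.Int.toStr (j : Int) ++ " index") := by
  intro fuel
  induction fuel with
  | zero =>
    intro lo hi hc hlo hhi hfuel H
    have hnone : PySem.List.index? (PySem.List.sorted arr (fun x => x)) k = none := by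
      rw [PySem.List.index?_eq_none_iff]
      intro hmem
      obtain ⟨j, hj, hv⟩ := List.mem_iff_getElem.1 hmem
      have := H j hj hv
      omega
    rw [hnone]; rfl
  | succ fuel ih =>
    intro lo hi hc hlo hhi hfuel H
    set a := PySem.List.sorted arr (fun x => x) with ha
    by_cases hle : lo ≤ hi
    · have hfd : PySem.Int.floordiv (hi - lo) 2 = (hi - lo) / 2 :=
        PySem.Int.floordiv_eq_ediv_of_pos (by omega)
      set mid := lo + PySem.Int.floordiv (hi - lo) 2 with hmid
      have hmlo : lo ≤ mid := by rw [hmid, hfd]; omega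
      have hmhi : mid ≤ hi := by rw [hmid, hfd]; omega
      have hmlen : mid < (a.length : Int) := by omega
      have hvm : ∃ v, a[mid.toNat]? = some v := ⟨_, List.getElem?_eq_getElem (by omega)⟩
      obtain ⟨v, hvm⟩ := hvm
      obtain ⟨hmlt, he⟩ := List.getElem?_eq_some_iff.1 hvm
      have hget : PySem.List.pyGet? a mid = some v := by
        rw [PySem.List.pyGet?_of_nonneg a (i := mid) (by omega)]; exact hvm
      by_cases hk : k = v
      · have hidx : PySem.List.index? a k = some mid.toNat :=
          index?_eq_of_count_le_one a k mid.toNat hc (by omega) (he.trans hk.symm)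
        simp only [pvLoopA, hle, if_true, ← hmid, hget, if_pos hk, hidx, Option.pure_def,
          Option.bind_eq_bind, Option.bind_some, Option.map_some]
        have hcast : ((mid.toNat : Nat) : Int) = mid := by omega
        rw [hcast]
      · by_cases hlt : k < v
        · simp only [pvLoopA, hle, if_true, ← hmid, hget, if_neg hk, if_pos hlt]
          apply ih lo (mid - 1) hc hlo (by omega) (by omega)
          intro j hj hv
          have hjb := H j hj hv
          refine ⟨hjb.1, ?_⟩
          by_contra hcon
          have hmj : mid.toNat ≤ j := by omega
          have hvk : v ≤ k := by
            rw [← he, ← hv]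
            exact PySem.List.sorted_id_getElem_mono (xs := arr) hmj hj
          omega
        · simp only [pvLoopA, hle, if_true, ← hmid, hget, if_neg hk, if_neg hlt]
          apply ih (mid + 1) hi hc (by omega) hhi (by omega)
          intro j hj hv
          have hjb := H j hj hv
          refine ⟨?_, hjb.2⟩
          by_contra hcon
          have hmj : j ≤ mid.toNat := by omega
          have hvk : k ≤ v := by
            rw [← hv, ← he]
            exact PySem.List.sorted_id_getElem_mono (xs := arr) hmj (by omega)
          omega
    · have hnone : PySem.List.index? a k = none := by
        rw [PySem.List.index?_eq_none_iff]
        intro hmem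
        obtain ⟨j, hj, hv⟩ := List.mem_iff_getElem.1 hmem
        have := H j hj hv
        omega
      simp only [pvLoopA, hle, if_false]
      rw [hnone]; rfl

-- ===== VERDICT (by name: the statement is the Claim_ definition above) =====
theorem binary_search_prac_spec : Claim_equal_binary_search_prac := by
  intro arr k _ hpre
  unfold Spec_binary_search_prac binary_search_prac binary_search_prac_alt
  have hc : (PySem.List.sorted arr (fun x => x)).count k ≤ 1 := by
    have := (PySem.List.sorted_perm arr (fun x => x) false).count_eq k
    unfold Pre_binary_search_prac at hpre
    omega
  rw [pvScanB_eq_index? k _ 0,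
    pvLoopA_eq_index? arr k _ 0 ((PySem.List.sorted arr (fun x => x)).length - 1) hc
      (by omega) (by omega) (by push_cast; omega)
      (by intro j hj _; constructor <;> omega)]
  simp only [Nat.zero_add]
  cases PySem.List.index? (PySem.List.sorted arr (fun x => x)) k <;> rfl
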